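-- pv_equiv track=rewrite | github.com/artur-shlyapnikov/ilograph-cli | src/ilograph_cli/io/yaml_style.py | _normalize_flow_style_spacing
-- ===== SOURCE A (Python) =====
-- _FLOW_STYLE_PUNCTUATION: frozenset[str] = frozenset("{}[],:")
--
-- def _normalize_flow_style_spacing(line: str) -> str:
--     output: list[str] = []
--     pending_space = False
--     in_single_quotes = False
--     in_double_quotes = False
--     escape_next = False
--
--     for char in line:
--         if in_single_quotes:
--             output.append(char)
--             if char == "'":
--                 in_single_quotes = False
--             continue
--
--         if in_double_quotes:
--             output.append(char)
--             if escape_next: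
--                 escape_next = False
--                 continue
--             if char == "\\":
--                 escape_next = True
--                 continue
--             if char == '"':
--                 in_double_quotes = False
--             continue
--
--         if char == "'":
--             if pending_space and output and output[-1] not in _FLOW_STYLE_PUNCTUATION:
--                 output.append(" ")
--             pending_space = False
--             output.append(char)
--             in_single_quotes = True
--             continue
--
--         if char == '"':
--             if pending_space and output and output[-1] not in _FLOW_STYLE_PUNCTUATION:
--                 output.append(" ")
--             pending_space = False
--             output.append(char)
--             in_double_quotes = True
--             continue
--
--         if char.isspace():
--             pending_space = True
--             continue
--
--         if char in _FLOW_STYLE_PUNCTUATION: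
--             if output and output[-1] == " ":
--                 output.pop()
--             output.append(char)
--             pending_space = False
--             continue
--
--         if pending_space and output and output[-1] not in _FLOW_STYLE_PUNCTUATION:
--             output.append(" ")
--         pending_space = False
--         output.append(char)
--
--     return "".join(output)
-- ===== SOURCE B (Python) =====
-- _FLOW_STYLE_PUNCTUATION: frozenset[str] = frozenset("{}[],:")
--
-- def _normalize_flow_style_spacing(line: str) -> str:
--     # Phase 1: tokenize into (preceded_by_space, text) pairs.
--     tokens = []
--     pending = False
--     i, n = 0, len(line)
--     while i < n:
--         c = line[i]
--         if c.isspace():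
--             pending = True
--             i += 1
--             continue
--         if c == "'":
--             j = i + 1
--             while j < n and line[j] != "'":
--                 j += 1
--             j = min(j + 1, n)
--             tokens.append((pending, line[i:j]))
--             pending = False
--             i = j
--             continue
--         if c == '"':
--             j = i + 1
--             while j < n:
--                 if line[j] == '\\':
--                     j += 2
--                 elif line[j] == '"':
--                     j += 1
--                     break
--                 else:
--                     j += 1
--             j = min(j, n)
--             tokens.append((pending, line[i:j]))
--             pending = False
--             i = j
--             continue
--         tokens.append((pending, c))
--         pending = False
--         i += 1
--     # Phase 2: join, inserting a single space only between non-punctuation neighbors.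
--     parts = []
--     for flag, text in tokens:
--         if flag and parts and parts[-1][-1] not in _FLOW_STYLE_PUNCTUATION \
--                 and text[0] not in _FLOW_STYLE_PUNCTUATION:
--             parts.append(" ")
--         parts.append(text)
--     return "".join(parts)
-- ===== Notes on version B (the rewrite author's own statement) =====
-- stated objective: alternative
-- what changed: Replaces A's single-pass five-flag state machine with a two-phase design: first tokenize the line into (preceded-by-space, text) tokens (quoted runs, punctuation chars, plain chars), then join the tokens, inserting a space only between two non-punctuation neighbours.
import Mathlib
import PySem

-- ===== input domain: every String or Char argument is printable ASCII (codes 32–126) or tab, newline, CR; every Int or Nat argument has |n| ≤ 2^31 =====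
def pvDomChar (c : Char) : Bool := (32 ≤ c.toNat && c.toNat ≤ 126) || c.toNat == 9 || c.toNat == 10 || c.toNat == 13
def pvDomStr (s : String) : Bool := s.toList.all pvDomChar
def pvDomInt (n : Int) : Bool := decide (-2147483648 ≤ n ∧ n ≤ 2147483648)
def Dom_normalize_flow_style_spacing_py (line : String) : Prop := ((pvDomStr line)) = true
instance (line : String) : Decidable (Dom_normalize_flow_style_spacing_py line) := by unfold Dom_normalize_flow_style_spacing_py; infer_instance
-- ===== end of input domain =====

-- B re-implements A as two phases (tokenize, then join) instead of A's one-pass state machine;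
-- objective: alternative decomposition, same exact output.

-- ===== PORT A =====
-- _FLOW_STYLE_PUNCTUATION = frozenset("{}[],:")
def pvPunct (c : Char) : Bool :=
  c == '{' || c == '}' || c == '[' || c == ']' || c == ',' || c == ':'

-- "output and output[-1] not in _FLOW_STYLE_PUNCTUATION" (on output's last element)
def pvLastNotPunct (l : Option Char) : Bool :=
  match l with
  | some a => !pvPunct a
  | none => false

-- the for-loop of A: state (output, pending_space, in_single_quotes, in_double_quotes, escape_next)
def pvGoA : List Char → List Char → Bool → Bool → Bool → Bool → List Char
  | [], out, _, _, _, _ => out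
  | c :: cs, out, pend, inS, inD, esc =>
    if inS then
      pvGoA cs (out ++ [c]) pend (if c = '\'' then false else inS) inD esc
    else if inD then
      if esc then pvGoA cs (out ++ [c]) pend inS inD false
      else if c = '\\' then pvGoA cs (out ++ [c]) pend inS inD true
      else if c = '"' then pvGoA cs (out ++ [c]) pend inS false esc
      else pvGoA cs (out ++ [c]) pend inS inD esc
    else if c = '\'' then
      pvGoA cs ((if pend && pvLastNotPunct out.getLast? then out ++ [' '] else out) ++ [c])
        false true inD esc
    else if c = '"' then
      pvGoA cs ((if pend && pvLastNotPunct out.getLast? then out ++ [' '] else out) ++ [c])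
        false inS true esc
    else if PySem.Chars.isspace c then
      pvGoA cs out true inS inD esc
    else if pvPunct c then
      pvGoA cs ((if out.getLast? = some ' ' then out.dropLast else out) ++ [c]) false inS inD esc
    else
      pvGoA cs ((if pend && pvLastNotPunct out.getLast? then out ++ [' '] else out) ++ [c])
        false inS inD esc

def normalize_flow_style_spacing_py (line : String) : String :=
  String.ofList (pvGoA line.toList [] false false false false)

-- ===== PORT B =====
-- B's single-quote scan: consume up to and including the closing quote; (consumed, rest)
def pvScanS : List Char → List Char × List Char
  | [] => ([], [])
  | c :: cs =>
    if c = '\'' then ([c], cs)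
    else
      let (t, r) := pvScanS cs
      (c :: t, r)

-- B's double-quote scan: a backslash consumes the next char; (consumed, rest)
def pvScanD : List Char → List Char × List Char
  | [] => ([], [])
  | c :: cs =>
    if c = '\\' then
      match cs with
      | [] => ([c], [])
      | d :: cs' =>
        let (t, r) := pvScanD cs'
        (c :: d :: t, r)
    else if c = '"' then ([c], cs)
    else
      let (t, r) := pvScanD cs
      (c :: t, r)

-- termination facts for the tokenizer (cited by decreasing_by)
theorem pvScanS_rest_le (cs : List Char) : (pvScanS cs).2.length ≤ cs.length := by
  induction cs with
  | nil => simp [pvScanS]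
  | cons c cs ih =>
    simp only [pvScanS]
    split
    · simp
    · simpa using Nat.le_succ_of_le ih

theorem pvScanD_rest_le (cs : List Char) : (pvScanD cs).2.length ≤ cs.length := by
  induction cs using pvScanD.induct with
  | case1 => simp [pvScanD]
  | case2 => simp [pvScanD]
  | case3 d cs' t r heq ih =>
    have ih' : r.length ≤ cs'.length := by rw [heq] at ih; simpa using ih
    rw [show pvScanD ('\\' :: d :: cs') = ('\\' :: d :: t, r) by rw [pvScanD.eq_def]; simp [heq]]
    simp only [List.length_cons]
    omega
  | case4 cs' h =>
    rw [show pvScanD ('\"' :: cs') = (['\"'], cs') by rw [pvScanD.eq_def]; simp]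
    simp
  | case5 c cs' h1 h2 t r heq ih =>
    have ih' : r.length ≤ cs'.length := by rw [heq] at ih; simpa using ih
    rw [show pvScanD (c :: cs') = (c :: t, r) by rw [pvScanD.eq_def]; simp [h1, h2, heq]]
    simp only [List.length_cons]
    omega

-- Phase 1: tokens (preceded_by_space, text)
def pvTok : List Char → Bool → List (Bool × List Char)
  | [], _ => []
  | c :: cs, pend =>
    if PySem.Chars.isspace c then pvTok cs true
    else if c = '\'' then
      (pend, c :: (pvScanS cs).1) :: pvTok (pvScanS cs).2 false
    else if c = '"' then
      (pend, c :: (pvScanD cs).1) :: pvTok (pvScanD cs).2 false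
    else (pend, [c]) :: pvTok cs false
  termination_by cs _ => cs.length
  decreasing_by
  · simp
  · exact Nat.lt_succ_of_le (pvScanS_rest_le cs)
  · exact Nat.lt_succ_of_le (pvScanD_rest_le cs)
  · simp

-- "parts and parts[-1][-1] not in FLOW and text[0] not in FLOW"
def pvSepOk (l h : Option Char) : Bool :=
  match l, h with
  | some a, some b => !pvPunct a && !pvPunct b
  | _, _ => false

-- Phase 2: join tokens, a single space only between non-punctuation neighbours
def pvJoin : List (Bool × List Char) → List Char → List Char
  | [], out => out
  | (f, t) :: ts, out =>
    pvJoin ts (if f && pvSepOk out.getLast? t.head? then out ++ [' '] ++ t else out ++ t)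

def normalize_flow_style_spacing_py_alt (line : String) : String :=
  String.ofList (pvJoin (pvTok line.toList false) [])

-- ===== PRECONDITION & SPEC =====
def Spec_normalize_flow_style_spacing_py (line : String) (out : String) : Prop := out = normalize_flow_style_spacing_py_alt line
instance (line : String) (out : String) : Decidable (Spec_normalize_flow_style_spacing_py line out) := by unfold Spec_normalize_flow_style_spacing_py; infer_instance

-- ===== CLAIM (what is proved, stated in full; the proofs are below) =====
def Claim_equal_normalize_flow_style_spacing_py : Prop := ∀ (line : String), Dom_normalize_flow_style_spacing_py line → Spec_normalize_flow_style_spacing_py line (normalize_flow_style_spacing_py line)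

-- ===== LEMMAS AND PROOFS =====

-- pvJoin over tokens only reads the last char of the accumulated output
def pvJoinF : Option Char → List (Bool × List Char) → List Char
  | _, [] => []
  | l, (f, t) :: ts =>
    (if f && pvSepOk l t.head? then [' '] else []) ++ t ++ pvJoinF (t.getLast?.or l) ts

theorem pvJoin_eq (ts : List (Bool × List Char)) :
    ∀ out, pvJoin ts out = out ++ pvJoinF out.getLast? ts := by
  induction ts with
  | nil => intro out; simp [pvJoin, pvJoinF]
  | cons p ts ih =>
    intro out
    obtain ⟨f, t⟩ := p
    simp only [pvJoin, pvJoinF]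
    by_cases h : (f && pvSepOk out.getLast? t.head?) = true
    · rcases t with _ | ⟨x, xs⟩
      · cases h' : out.getLast? <;> rw [h'] at h <;> simp [pvSepOk] at h
      · rw [if_pos h, if_pos h, ih]
        obtain ⟨y, hy⟩ : ∃ y, (x :: xs).getLast? = some y :=
          ⟨(x :: xs).getLast (by simp), List.getLast?_eq_some_getLast _⟩
        simp [List.getLast?_append, hy]
    · rw [if_neg h, if_neg h, ih]
      simp [List.getLast?_append]

-- a terminated single-quote scan ends in a quote
theorem pvScanS_last (cs : List Char) (h : (pvScanS cs).2 ≠ []) :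
    (pvScanS cs).1.getLast? = some '\'' := by
  induction cs with
  | nil => simp [pvScanS] at h
  | cons c cs ih =>
    by_cases hc : c = '\''
    · simp [pvScanS, hc]
    · simp only [pvScanS, if_neg hc] at h ⊢
      rcases h' : (pvScanS cs).1 with _ | ⟨x, xs⟩
      · have := ih h
        simp [h'] at this
      · have := ih h
        simp [h'] at this ⊢
        exact this

theorem pvScanD_last (cs : List Char) (h : (pvScanD cs).2 ≠ []) :
    (pvScanD cs).1.getLast? = some '"' := by
  induction cs using pvScanD.induct with
  | case1 => simp [pvScanD] at h
  | case2 => simp [pvScanD] at h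
  | case3 d cs' t r heq ih =>
    rw [show pvScanD ('\\' :: d :: cs') = ('\\' :: d :: t, r) by rw [pvScanD.eq_def]; simp [heq]] at h ⊢
    have := ih (by rw [heq]; simpa using h)
    rw [heq] at this
    rcases t with _ | ⟨x, xs⟩
    · simp at this
    · simpa using this
  | case4 cs' hne =>
    rw [show pvScanD ('\"' :: cs') = (['\"'], cs') by rw [pvScanD.eq_def]; simp]
    simp
  | case5 c cs' h1 h2 t r heq ih =>
    rw [show pvScanD (c :: cs') = (c :: t, r) by rw [pvScanD.eq_def]; simp [h1, h2, heq]] at h ⊢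
    have := ih (by rw [heq]; simpa using h)
    rw [heq] at this
    rcases t with _ | ⟨x, xs⟩
    · simp at this
    · simpa using this

-- A inside single quotes consumes exactly what pvScanS consumes
theorem pvGoA_single (cs : List Char) : ∀ out,
    pvGoA cs out false true false false
      = pvGoA (pvScanS cs).2 (out ++ (pvScanS cs).1) false false false false := by
  induction cs with
  | nil => intro out; simp [pvGoA, pvScanS]
  | cons c cs ih =>
    intro out
    by_cases hc : c = '\''
    · simp [pvGoA, pvScanS, hc]
    · simp only [pvGoA, pvScanS, if_neg hc, if_pos]
      rw [ih]
      simp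

-- A inside double quotes consumes exactly what pvScanD consumes
theorem pvGoA_double (cs : List Char) : ∀ out,
    pvGoA cs out false false true false
      = pvGoA (pvScanD cs).2 (out ++ (pvScanD cs).1) false false false false := by
  induction cs using pvScanD.induct with
  | case1 => intro out; simp [pvGoA, pvScanD]
  | case2 => intro out; simp [pvGoA, pvScanD]
  | case3 d cs' t r heq ih =>
    intro out
    rw [heq] at ih
    rw [show pvScanD ('\\' :: d :: cs') = ('\\' :: d :: t, r) by rw [pvScanD.eq_def]; simp [heq]]
    rw [show pvGoA ('\\' :: d :: cs') out false false true false
          = pvGoA cs' (out ++ ['\\'] ++ [d]) false false true false by simp [pvGoA]]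
    rw [ih]
    simp
  | case4 cs' hne =>
    intro out
    rw [show pvScanD ('\"' :: cs') = (['\"'], cs') by rw [pvScanD.eq_def]; simp]
    simp [pvGoA]
  | case5 c cs' h1 h2 t r heq ih =>
    intro out
    rw [heq] at ih
    rw [show pvScanD (c :: cs') = (c :: t, r) by rw [pvScanD.eq_def]; simp [h1, h2, heq]]
    rw [show pvGoA (c :: cs') out false false true false
          = pvGoA cs' (out ++ [c]) false false true false by simp [pvGoA, h1, h2]]
    rw [ih]
    simp

theorem pvSepOk_some (l : Option Char) (c : Char) :
    pvSepOk l (some c) = (pvLastNotPunct l && !pvPunct c) := by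
  cases l <;> simp [pvSepOk, pvLastNotPunct]

theorem pv_getLast?_cons_or (a : Char) (t : List Char) :
    (a :: t).getLast? = t.getLast?.or (some a) := by
  induction t generalizing a with
  | nil => simp
  | cons b t ih =>
    rw [List.getLast?_cons_cons, ih b]
    cases t.getLast? <;> simp

theorem pv_main : ∀ n (cs : List Char), cs.length ≤ n → ∀ (out : List Char) (pend : Bool),
    (cs ≠ [] → out.getLast? ≠ some ' ') →
    pvGoA cs out pend false false false = out ++ pvJoinF out.getLast? (pvTok cs pend) := by
  intro n
  induction n with
  | zero =>
    intro cs hlen out pend _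
    have hnil : cs = [] := by cases cs <;> simp_all
    subst hnil
    simp [pvGoA, pvTok, pvJoinF]
  | succ n ihn =>
    intro cs hlen out pend hlast
    rcases cs with _ | ⟨c, cs'⟩
    · simp [pvGoA, pvTok, pvJoinF]
    · have hl : out.getLast? ≠ some ' ' := hlast (by simp)
      have hlen' : cs'.length ≤ n := by simpa using hlen
      by_cases hsp : PySem.Chars.isspace c = true
      · -- whitespace: set pending_space / start a gap
        have hq1 : ¬ c = '\'' := by rintro rfl; exact absurd hsp (by decide)
        have hq2 : ¬ c = '"' := by rintro rfl; exact absurd hsp (by decide)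
        rw [show pvGoA (c :: cs') out pend false false false
              = pvGoA cs' out true false false false by simp [pvGoA, hq1, hq2, hsp]]
        rw [show pvTok (c :: cs') pend = pvTok cs' true by rw [pvTok.eq_def]; simp [hsp]]
        exact ihn cs' hlen' out true (fun _ => hl)
      · by_cases hq1 : c = '\''
        · -- single-quoted token
          subst hq1
          rw [show pvGoA ('\'' :: cs') out pend false false false
                = pvGoA cs' ((if pend && pvLastNotPunct out.getLast? then out ++ [' '] else out)
                    ++ ['\'']) false true false false by simp [pvGoA]]
          rw [pvGoA_single]
          rw [show pvTok ('\'' :: cs') pend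
                = (pend, '\'' :: (pvScanS cs').1) :: pvTok (pvScanS cs').2 false by
              rw [pvTok.eq_def]
              simp [show PySem.Chars.isspace '\'' = false from by decide]]
          have hrlen : (pvScanS cs').2.length ≤ n := le_trans (pvScanS_rest_le cs') hlen'
          rw [ihn (pvScanS cs').2 hrlen _ false (by
            intro hne
            have hlastq := pvScanS_last cs' hne
            simp [List.getLast?_append, pv_getLast?_cons_or, hlastq])]
          cases hgl : (pvScanS cs').1.getLast? <;>
            cases hc : (pend && pvLastNotPunct out.getLast?) <;>
              simp [pvJoinF, pvSepOk_some, pvPunct, hc, hgl,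
                pv_getLast?_cons_or, List.getLast?_append]
        · by_cases hq2 : c = '"'
          · -- double-quoted token
            subst hq2
            rw [show pvGoA ('"' :: cs') out pend false false false
                  = pvGoA cs' ((if pend && pvLastNotPunct out.getLast? then out ++ [' '] else out)
                      ++ ['"']) false false true false by simp [pvGoA, hq1]]
            rw [pvGoA_double]
            rw [show pvTok ('"' :: cs') pend
                  = (pend, '"' :: (pvScanD cs').1) :: pvTok (pvScanD cs').2 false by
                rw [pvTok.eq_def]
                simp [show PySem.Chars.isspace '"' = false from by decide,
                  show ¬ ('"' : Char) = '\'' from by decide]]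
            have hrlen : (pvScanD cs').2.length ≤ n := le_trans (pvScanD_rest_le cs') hlen'
            rw [ihn (pvScanD cs').2 hrlen _ false (by
              intro hne
              have hlastq := pvScanD_last cs' hne
              simp [List.getLast?_append, pv_getLast?_cons_or, hlastq])]
            cases hgl : (pvScanD cs').1.getLast? <;>
              cases hc : (pend && pvLastNotPunct out.getLast?) <;>
                simp [pvJoinF, pvSepOk_some, pvPunct, hc, hgl,
                  pv_getLast?_cons_or, List.getLast?_append]
          · by_cases hpct : pvPunct c = true
            · -- flow punctuation: glue to both neighbours
              have hcs : ¬ c = ' ' := by rintro rfl; exact absurd hpct (by decide)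
              rw [show pvGoA (c :: cs') out pend false false false
                    = pvGoA cs' ((if out.getLast? = some ' ' then out.dropLast else out) ++ [c])
                        false false false false by simp [pvGoA, hq1, hq2, hsp, hpct]]
              rw [if_neg hl]
              rw [show pvTok (c :: cs') pend = (pend, [c]) :: pvTok cs' false by
                rw [pvTok.eq_def]; simp [hsp, hq1, hq2]]
              rw [ihn cs' hlen' _ false (by
                intro _
                simp only [List.getLast?_append]
                simp [hcs])]
              simp only [pvJoinF, List.head?, pvSepOk_some, hpct, Bool.not_true,
                Bool.and_false, Bool.false_eq_true, if_false]
              simp [List.getLast?_append]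
            · -- plain character
              have hcs : ¬ c = ' ' := by rintro rfl; exact absurd (by decide) hsp
              rw [show pvGoA (c :: cs') out pend false false false
                    = pvGoA cs' ((if pend && pvLastNotPunct out.getLast? then out ++ [' '] else out)
                        ++ [c]) false false false false by simp [pvGoA, hq1, hq2, hsp, hpct]]
              rw [show pvTok (c :: cs') pend = (pend, [c]) :: pvTok cs' false by
                rw [pvTok.eq_def]; simp [hsp, hq1, hq2]]
              rw [ihn cs' hlen' _ false (by
                intro _
                simp only [List.getLast?_append]
                simp [hcs])]
              simp only [pvJoinF, List.head?, pvSepOk_some, Bool.not_eq_true] at *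
              rw [show pvPunct c = false from by simpa using hpct]
              simp only [Bool.not_false, Bool.and_true]
              by_cases hc : (pend && pvLastNotPunct out.getLast?) = true
              · rw [if_pos hc, if_pos hc]
                simp [List.getLast?_append]
              · rw [if_neg hc, if_neg hc]
                simp [List.getLast?_append]

-- ===== VERDICT (by name: the statement is the Claim_ definition above) =====
theorem normalize_flow_style_spacing_py_spec : Claim_equal_normalize_flow_style_spacing_py := by
  intro line _
  unfold Spec_normalize_flow_style_spacing_py normalize_flow_style_spacing_py normalize_flow_style_spacing_py_alt
  rw [pv_main line.toList.length line.toList (le_refl _) [] false (by simp)]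
  rw [pvJoin_eq]
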